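-- pv_equiv track=rewrite | github.com/mouredev/retos-programacion-2023 | Retos/Reto #9 - HETEROGRAMA, ISOGRAMA Y PANGRAMA [Fácil]/python/cesar-ch.py | is_isograma
-- ===== SOURCE A (Python) =====
-- def is_isograma(word):
--     obj_words = {}
--     for e in word:
--         if e in obj_words:
--             obj_words[e] += 1
--         else:
--             obj_words[e] = 1
--     return all(e % 2 == 0 or e == 1 for e in obj_words.values())
-- ===== SOURCE B (Python) =====
-- def is_isograma(word):
--     s = sorted(word)
--     i, n = 0, len(s)
--     while i < n:
--         j = i + 1
--         while j < n and s[j] == s[i]: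
--             j += 1
--         run = j - i
--         if run % 2 != 0 and run != 1:
--             return False
--         i = j
--     return True
-- ===== Notes on version B (the rewrite author's own statement) =====
-- stated objective: alternative
-- what changed: Replaces the frequency-dict single pass with sort-then-scan: sort the characters so equal ones are adjacent, then walk the sorted list once checking each maximal run's length is even or 1.
import Mathlib
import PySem

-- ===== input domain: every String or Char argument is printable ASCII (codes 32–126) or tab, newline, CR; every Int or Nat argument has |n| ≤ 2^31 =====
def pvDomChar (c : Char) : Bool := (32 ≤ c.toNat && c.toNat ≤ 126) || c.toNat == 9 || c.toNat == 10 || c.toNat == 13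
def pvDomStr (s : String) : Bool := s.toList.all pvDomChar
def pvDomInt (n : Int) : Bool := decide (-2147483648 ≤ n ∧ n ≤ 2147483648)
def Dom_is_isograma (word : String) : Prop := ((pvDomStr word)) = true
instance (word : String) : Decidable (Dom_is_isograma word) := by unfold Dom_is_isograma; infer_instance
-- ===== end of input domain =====

-- B replaces A's frequency dict with sort-then-scan: sort the characters and check each maximal run's length is even or 1 (alternative algorithm, same behaviour).


-- ===== PORT A =====
def is_isograma (word : String) : Bool :=
  let obj_words : PySem.Dict Char Int :=
    word.toList.foldl
      (fun d e =>
        if d.contains e then d.insert e (d.getD e 0 + 1)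
        else d.insert e 1)
      PySem.Dict.empty
  obj_words.values.all (fun e => PySem.Int.mod e 2 == 0 || e == 1)

-- ===== PORT B =====
-- the outer while loop of Source B: consume one maximal run of equal characters per step
def pvRunCheck : List Char → Bool
  | [] => true
  | c :: rest =>
    let run := 1 + (rest.takeWhile (fun x => x == c)).length
    ((run % 2 == 0) || (run == 1)) && pvRunCheck (rest.dropWhile (fun x => x == c))
termination_by l => l.length
decreasing_by
  simpa using Nat.lt_succ_of_le (List.length_dropWhile_le _ _)

def is_isograma_alt (word : String) : Bool :=
  pvRunCheck (PySem.List.sorted word.toList (fun x => x) false)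

-- ===== PRECONDITION & SPEC =====
def Spec_is_isograma (word : String) (out : Bool) : Prop := out = is_isograma_alt word
instance (word : String) (out : Bool) : Decidable (Spec_is_isograma word out) := by unfold Spec_is_isograma; infer_instance

-- ===== CLAIM (what is proved, stated in full; the proofs are below) =====
def Claim_equal_is_isograma : Prop := ∀ (word : String), Dom_is_isograma word → Spec_is_isograma word (is_isograma word)

-- ===== LEMMAS AND PROOFS =====

theorem pv_fold_eq_counter (xs : List Char) :
    xs.foldl
      (fun d e =>
        if d.contains e then d.insert e (d.getD e 0 + 1)
        else d.insert e 1)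
      PySem.Dict.empty = PySem.Dict.counter xs := by
  rw [← PySem.Dict.foldl_insert_getD_add_one_eq_counter]
  congr 1
  funext d e
  by_cases h : d.contains e
  · simp [h]
  · have h0 : d.getD e 0 = (0 : Int) :=
      PySem.Dict.getD_of_not_contains d 0 (by simpa using h)
    simp [h, h0]

theorem pv_pred_eq (n : Nat) :
    ((PySem.Int.mod (n : Int) 2 == 0) || ((n : Int) == 1))
      = ((n % 2 == 0) || (n == 1)) := by
  rw [PySem.Int.mod_eq_emod_of_pos (by norm_num)]
  by_cases h : n % 2 = 0
  · have h' : (n:Int) % 2 = 0 := by omega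
    simp [h, h']
  · have h' : (n:Int) % 2 ≠ 0 := by omega
    by_cases h1 : n = 1
    · subst h1; simp
    · have h1' : (n:Int) ≠ 1 := by omega
      rw [beq_eq_false_iff_ne.2 h', beq_eq_false_iff_ne.2 h1', beq_eq_false_iff_ne.2 h1]
      simp [h]

-- in a sorted list whose elements are all ≥ c, after dropping the leading c's no c remains
theorem pv_notin_drop (c : Char) (l : List Char)
    (hs : l.Pairwise (· ≤ ·)) (hge : ∀ x ∈ l, c ≤ x) :
    c ∉ l.dropWhile (fun x => x == c) := by
  induction l with
  | nil => simp
  | cons x rs ih =>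
    by_cases hx : x = c
    · subst hx
      rw [List.dropWhile_cons_of_pos (by simp)]
      exact ih hs.tail (fun y hy => hge y (List.mem_cons_of_mem _ hy))
    · rw [List.dropWhile_cons_of_neg (by simpa using hx)]
      intro hc
      rcases List.mem_cons.1 hc with h | h
      · exact hx h.symm
      · have h1 : x ≤ c := List.rel_of_pairwise_cons hs h
        have h2 : c ≤ x := hge x (by simp)
        exact hx (le_antisymm h1 h2)

-- run-check on a sorted list ⟺ every member's count is even or 1
theorem pv_runCheck_iff (l : List Char) (hs : l.Pairwise (· ≤ ·)) :
    pvRunCheck l = true ↔ ∀ c ∈ l, (l.count c % 2 == 0 || l.count c == 1) = true := by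
  induction l using pvRunCheck.induct with
  | case1 => simp [pvRunCheck]
  | case2 c rest ih =>
    have hT := List.takeWhile_append_dropWhile (p := fun x => x == c) (l := rest)
    set t := rest.takeWhile (fun x => x == c) with ht
    set d := rest.dropWhile (fun x => x == c) with hd
    have htc : ∀ x ∈ t, x = c := by
      intro x hx
      have := List.mem_takeWhile_imp hx
      simpa using this
    have hdnc : c ∉ d := by
      apply pv_notin_drop c rest hs.tail
      intro x hx
      exact List.rel_of_pairwise_cons hs hx
    have hds : d.Pairwise (· ≤ ·) := by
      have : rest.Pairwise (· ≤ ·) := hs.tail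
      rw [← hT] at this
      exact (List.pairwise_append.1 this).2.1
    -- counts
    have hcount_c : (c :: rest).count c = 1 + t.length := by
      have h1 : t.count c = t.length := by
        rw [List.count_eq_length]; intro b hb; exact (htc b hb).symm
      have h2 : d.count c = 0 := List.count_eq_zero.2 hdnc
      rw [List.count_cons_self, ← hT, List.count_append, h1, h2]; omega
    have hcount_ne : ∀ x, x ≠ c → (c :: rest).count x = d.count x := by
      intro x hx
      have h1 : t.count x = 0 := by
        rw [List.count_eq_zero]; intro hmem; exact hx (htc x hmem)
      rw [← hT]
      simp [List.count_append, h1, Ne.symm hx]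
    have hmem : ∀ x, x ∈ (c :: rest) ↔ x = c ∨ x ∈ d := by
      intro x
      constructor
      · intro hx
        rcases List.mem_cons.1 hx with h | h
        · exact Or.inl h
        · rw [← hT] at h
          rcases List.mem_append.1 h with h | h
          · exact Or.inl (htc x h)
          · exact Or.inr h
      · rintro (rfl | h)
        · exact List.mem_cons_self
        · exact List.mem_cons_of_mem _ (by rw [← hT]; exact List.mem_append_right _ h)
    rw [pvRunCheck]
    simp only [Bool.and_eq_true]
    rw [ih hds]
    constructor
    · rintro ⟨hrun, hall⟩ x hx
      rcases (hmem x).1 hx with rfl | hxd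
      · rwa [hcount_c]
      · have hxc : x ≠ c := fun h => hdnc (h ▸ hxd)
        rw [hcount_ne x hxc]
        exact hall x hxd
    · intro hall
      refine ⟨?_, ?_⟩
      · have := hall c List.mem_cons_self
        rwa [hcount_c] at this
      · intro x hx
        have hxc : x ≠ c := fun h => hdnc (h ▸ hx)
        have := hall x ((hmem x).2 (Or.inr hx))
        rwa [hcount_ne x hxc] at this

-- ===== VERDICT (by name: the statement is the Claim_ definition above) =====
theorem is_isograma_spec : Claim_equal_is_isograma := by
  intro word _
  unfold Spec_is_isograma is_isograma is_isograma_alt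
  rw [pv_fold_eq_counter]
  set xs := word.toList with hxs
  set s := PySem.List.sorted xs (fun x => x) false with hsrt
  have hperm : s.Perm xs := PySem.List.sorted_perm xs _ _
  have hsorted : s.Pairwise (· ≤ ·) := by
    simpa using PySem.List.sorted_pairwise xs (fun x => x)
  rw [Bool.eq_iff_iff]
  rw [pv_runCheck_iff s hsorted]
  simp only [PySem.Dict.values, PySem.Dict.items_counter, List.map_map, List.all_eq_true,
    List.forall_mem_map, Function.comp]
  constructor
  · intro h c hc
    have hcx : c ∈ xs := hperm.mem_iff.1 hc
    have := h c ((PySem.Set.mem_ofList xs c).2 hcx)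
    rw [hperm.count_eq]
    rwa [pv_pred_eq (xs.count c)] at this
  · intro h c hc
    have hcx : c ∈ xs := (PySem.Set.mem_ofList xs c).1 hc
    have := h c (hperm.mem_iff.2 hcx)
    rw [hperm.count_eq] at this
    rwa [pv_pred_eq (xs.count c)]
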